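-- pv_equiv track=rewrite | github.com/ezechiana/qrma-report-engine | app/services/report_builder.py | normalise_rationale_leading_section
-- ===== SOURCE A (Python) =====
-- RATIONALE_SECTION_LABEL_MAP = {
--     "Adolescent Intelligence": "Cognitive function",
--     "Adolescent Growth Index": "Growth and development",
--     "Lecithin": "Cell membrane integrity and lipid transport",
--     "Channels and collaterals": "Circulatory and microvascular pathways",
--     "Eye": "Visual and microvascular support",
--     "Obesity": "Metabolic regulation and weight balance",
--     "Collagen": "Connective tissue and structural support",
-- }
--
-- def normalise_rationale_leading_section(text: str | None) -> str | None:
--     if not text: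
--         return text
--
--     out = text
--     for old, new in RATIONALE_SECTION_LABEL_MAP.items():
--         prefix = f"{old} contains "
--         replacement = f"{new} contains "
--         out = out.replace(prefix, replacement)
--
--     return out
-- ===== SOURCE B (Python) =====
-- RATIONALE_SECTION_LABEL_MAP = {
--     "Adolescent Intelligence": "Cognitive function",
--     "Adolescent Growth Index": "Growth and development",
--     "Lecithin": "Cell membrane integrity and lipid transport",
--     "Channels and collaterals": "Circulatory and microvascular pathways",
--     "Eye": "Visual and microvascular support",
--     "Obesity": "Metabolic regulation and weight balance",
--     "Collagen": "Connective tissue and structural support",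
-- }
--
-- def normalise_rationale_leading_section(text):
--     if not text:
--         return text
--
--     rules = [(old + " contains ", new + " contains ")
--              for old, new in RATIONALE_SECTION_LABEL_MAP.items()]
--     out = []
--     i, n = 0, len(text)
--     while i < n:
--         for prefix, replacement in rules:
--             if text.startswith(prefix, i):
--                 out.append(replacement)
--                 i += len(prefix)
--                 break
--         else:
--             out.append(text[i])
--             i += 1
--     return "".join(out)
-- ===== Notes on version B (the rewrite author's own statement) =====
-- stated objective: alternative
-- what changed: A makes seven sequential full-string str.replace passes, each pass rescanning the previous pass's output; B does one left-to-right scan over the text, applying at each position the first matching label rule in dict order, which is equivalent because no rule's match can start inside another rule's pattern occurrence or inside an inserted replacement.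
import Mathlib
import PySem

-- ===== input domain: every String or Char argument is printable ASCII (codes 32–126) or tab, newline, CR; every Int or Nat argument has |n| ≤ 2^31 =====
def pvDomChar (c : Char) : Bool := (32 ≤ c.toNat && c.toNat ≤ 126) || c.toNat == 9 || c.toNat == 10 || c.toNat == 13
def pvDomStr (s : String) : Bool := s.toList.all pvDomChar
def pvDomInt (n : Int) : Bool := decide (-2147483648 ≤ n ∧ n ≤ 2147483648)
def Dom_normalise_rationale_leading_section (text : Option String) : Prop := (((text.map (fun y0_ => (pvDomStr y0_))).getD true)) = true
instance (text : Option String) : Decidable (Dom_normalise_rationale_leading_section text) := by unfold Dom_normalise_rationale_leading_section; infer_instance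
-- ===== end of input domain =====

-- B replaces A's seven sequential full-string replace passes with one left-to-right scan that applies
-- the first matching rule at each position (alternative algorithm; identical return value).

-- ===== PORT A =====
-- RATIONALE_SECTION_LABEL_MAP, a module constant, as an association list in insertion order
def pvItems : List (String × String) := [
  ("Adolescent Intelligence", "Cognitive function"),
  ("Adolescent Growth Index", "Growth and development"),
  ("Lecithin", "Cell membrane integrity and lipid transport"),
  ("Channels and collaterals", "Circulatory and microvascular pathways"),
  ("Eye", "Visual and microvascular support"),
  ("Obesity", "Metabolic regulation and weight balance"),
  ("Collagen", "Connective tissue and structural support")]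

def normalise_rationale_leading_section (text : Option String) : Option String :=
  match text with
  | none => none                -- 'if not text: return text'
  | some s =>
    if s.isEmpty then some s    -- '' is falsy
    else
      some (pvItems.foldl
        (fun out pr => PySem.Str.replace out (pr.1 ++ " contains ") (pr.2 ++ " contains ")) s)

-- ===== PORT B =====
-- the precomputed 'rules' list of Source B, at the character level
def pvRules : List (List Char × List Char) :=
  pvItems.map (fun pr => ((pr.1 ++ " contains ").toList, (pr.2 ++ " contains ").toList))

-- Source B's while loop: at each position take the first rule whose prefix matches (the for/break),
-- else copy one character; the 'out' parts list + ''.join is ported as direct concatenation.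
-- (Every rule prefix is nonempty, so t.drop (pr.1.length - 1) is (c :: t).drop pr.1.length, i.e. i += len(prefix).)
def pvScan (rules : List (List Char × List Char)) : List Char → List Char
  | [] => []
  | c :: t =>
    match rules.find? (fun pr => pr.1.isPrefixOf (c :: t)) with
    | some pr => pr.2 ++ pvScan rules (t.drop (pr.1.length - 1))
    | none => c :: pvScan rules t
termination_by s => s.length
decreasing_by
  · simp only [List.length_drop, List.length_cons]; omega
  · simp

def normalise_rationale_leading_section_alt (text : Option String) : Option String :=
  match text with
  | none => none
  | some s =>
    if s.isEmpty then some s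
    else some (String.ofList (pvScan pvRules s.toList))

-- ===== PRECONDITION & SPEC =====
def Spec_normalise_rationale_leading_section (text : Option String) (out : Option String) : Prop := out = normalise_rationale_leading_section_alt text
instance (text : Option String) (out : Option String) : Decidable (Spec_normalise_rationale_leading_section text out) := by unfold Spec_normalise_rationale_leading_section; infer_instance

-- ===== CLAIM (what is proved, stated in full; the proofs are below) =====
def Claim_equal_normalise_rationale_leading_section : Prop := ∀ (text : Option String), Dom_normalise_rationale_leading_section text → Spec_normalise_rationale_leading_section text (normalise_rationale_leading_section text)

-- ===== LEMMAS AND PROOFS =====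

-- A clean recursion computing Python's s.replace(p, r) for nonempty p (proved equal to PySem's below).
def myRep (p r : List Char) : List Char → List Char
  | [] => []
  | c :: t =>
    if p.isPrefixOf (c :: t) then r ++ myRep p r (t.drop (p.length - 1))
    else c :: myRep p r t
termination_by s => s.length
decreasing_by
  · simp only [List.length_drop, List.length_cons]; omega
  · simp

-- The no-overlap conditions making the sequential passes equal to the priority scan:
-- no pattern match can start inside a replacement, span from a pattern occurrence into what follows
-- a replacement, or start strictly inside another pattern occurrence.
def okTbl (tbl : List (List Char × List Char)) : Prop :=
  (∀ pr ∈ tbl, pr.1 ≠ []) ∧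
  ∀ pr ∈ tbl, ∀ qr ∈ tbl,
    (∀ k < qr.2.length, ¬ pr.1 <+: qr.2.drop k ∧ ¬ qr.2.drop k <+: pr.1) ∧
    (∀ q < pr.1.length,
      (¬ pr.1.drop q <+: qr.2 ∧ ¬ qr.2 <+: pr.1.drop q) ∧
      (1 ≤ q → ¬ qr.1 <+: pr.1.drop q ∧ ¬ pr.1.drop q <+: qr.1))

theorem okTbl_pvRules : okTbl pvRules := by unfold okTbl; decide

theorem prefix_append_cases {p u v : List Char} (h : p <+: u ++ v) : p <+: u ∨ u <+: p := by
  obtain ⟨w, hw⟩ := h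
  rcases List.append_eq_append_iff.mp hw with ⟨a, ha, _⟩ | ⟨a, ha, _⟩
  · exact Or.inl ⟨a, ha.symm⟩
  · exact Or.inr ⟨a, ha.symm⟩

theorem myRep_nil (p r : List Char) : myRep p r [] = [] := by simp [myRep]

theorem myRep_pos {p : List Char} (r : List Char) {s : List Char} (hp : p ≠ []) (h : p <+: s) :
    myRep p r s = r ++ myRep p r (s.drop p.length) := by
  cases s with
  | nil =>
    exact absurd (List.prefix_nil.mp h) hp
  | cons c t =>
    rw [myRep, if_pos (List.isPrefixOf_iff_prefix.mpr h)]
    have h1 : p.length - 1 + 1 = p.length := by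
      have : p.length ≠ 0 := by simpa using hp
      omega
    rw [← h1, List.drop_succ_cons]
    simp only [Nat.add_sub_cancel]

theorem myRep_neg {p : List Char} (r : List Char) {c : Char} {t : List Char}
    (h : ¬ p <+: (c :: t)) : myRep p r (c :: t) = c :: myRep p r t := by
  rw [myRep, if_neg (fun hb => h (List.isPrefixOf_iff_prefix.mp hb))]

theorem pvScan_nil (l : List (List Char × List Char)) : pvScan l [] = [] := by simp [pvScan]

theorem pvScan_cons_some {l : List (List Char × List Char)} {c : Char} {t : List Char}
    {pr : List Char × List Char}
    (h : l.find? (fun pr => pr.1.isPrefixOf (c :: t)) = some pr) :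
    pvScan l (c :: t) = pr.2 ++ pvScan l (t.drop (pr.1.length - 1)) := by
  rw [pvScan, h]

theorem pvScan_cons_none {l : List (List Char × List Char)} {c : Char} {t : List Char}
    (h : l.find? (fun pr => pr.1.isPrefixOf (c :: t)) = none) :
    pvScan l (c :: t) = c :: pvScan l t := by
  rw [pvScan, h]

-- A replace pass walks over a block u inside which no match of p starts.
theorem rep_skip {p r' : List Char} :
    ∀ (u : List Char) {v : List Char},
      (∀ k, k < u.length → ¬ p <+: u.drop k ∧ ¬ u.drop k <+: p) →
      myRep p r' (u ++ v) = u ++ myRep p r' v := by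
  intro u
  induction u with
  | nil => intro v _; simp
  | cons c u' ih =>
    intro v h
    have h0 := h 0 (by simp)
    simp only [List.drop_zero] at h0
    have hnp : ¬ p <+: (c :: u') ++ v := by
      intro hpre
      rcases prefix_append_cases hpre with h1 | h1
      · exact h0.1 h1
      · exact h0.2 h1
    have : myRep p r' (c :: (u' ++ v)) = c :: myRep p r' (u' ++ v) := myRep_neg r' hnp
    simpa [this] using congrArg (c :: ·) (ih (fun k hk => h (k + 1) (by simpa using Nat.succ_lt_succ hk)))

-- The scan walks over a block u inside which no rule matches.
theorem scan_skip {l : List (List Char × List Char)} :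
    ∀ (u : List Char) {v : List Char},
      (∀ q, q < u.length → l.find? (fun pr => pr.1.isPrefixOf ((u ++ v).drop q)) = none) →
      pvScan l (u ++ v) = u ++ pvScan l v := by
  intro u
  induction u with
  | nil => intro v _; simp
  | cons c u' ih =>
    intro v h
    have h0 := h 0 (by simp)
    simp only [List.drop_zero, List.cons_append] at h0
    rw [List.cons_append, pvScan_cons_none h0]
    have := ih (v := v) (fun q hq => by
      simpa [List.cons_append] using h (q + 1) (by simpa using Nat.succ_lt_succ hq))
    simp [this]

-- No suffix of a pattern of the table begins to match at the head of a scan output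
-- unless it already matched at the head of the input.
theorem scan_no_create {tbl : List (List Char × List Char)} {l : List (List Char × List Char)}
    {x : List Char × List Char} (hok : okTbl tbl) (hl : ∀ r ∈ l, r ∈ tbl) (hx : x ∈ tbl) :
    ∀ (n : Nat) (cs : List Char), cs.length ≤ n →
      ∀ q, q < x.1.length → x.1.drop q <+: pvScan l cs → x.1.drop q <+: cs := by
  intro n
  induction n with
  | zero =>
    intro cs hcs q hq hpre
    have : cs = [] := List.length_eq_zero_iff.mp (Nat.le_zero.mp hcs)
    subst this
    rw [pvScan_nil] at hpre
    have := List.prefix_nil.mp hpre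
    have : x.1.length ≤ q := by
      have := congrArg List.length this
      simp at this
      omega
    omega
  | succ n ihn =>
    intro cs hcs q hq hpre
    cases cs with
    | nil =>
      rw [pvScan_nil] at hpre
      have := congrArg List.length (List.prefix_nil.mp hpre)
      simp at this
      omega
    | cons c t =>
      cases hf : l.find? (fun pr => pr.1.isPrefixOf (c :: t)) with
      | some pr =>
        rw [pvScan_cons_some hf] at hpre
        have hprmem : pr ∈ tbl := hl _ (List.mem_of_find?_eq_some hf)
        have hspan := ((hok.2 x hx pr hprmem).2 q hq).1
        rcases prefix_append_cases hpre with h1 | h1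
        · exact absurd h1 hspan.1
        · exact absurd h1 hspan.2
      | none =>
        rw [pvScan_cons_none hf] at hpre
        have hdrop : x.1.drop q = x.1[q] :: x.1.drop (q + 1) := List.drop_eq_getElem_cons hq
        rw [hdrop] at hpre
        rcases List.cons_prefix_cons.mp hpre with ⟨hc, hrest⟩
        by_cases hq1 : q + 1 < x.1.length
        · have := ihn t (by simpa using Nat.lt_succ_iff.mp (by simpa using hcs)) (q + 1) hq1 hrest
          rw [hdrop, hc]
          exact List.cons_prefix_cons.mpr ⟨rfl, this⟩
        · have : x.1.drop (q + 1) = [] := List.drop_eq_nil_of_le (by omega)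
          rw [hdrop, hc, this]
          exact List.cons_prefix_cons.mpr ⟨rfl, List.nil_prefix⟩

-- One more replace pass on top of the scan with rule list l is the scan with rule list l ++ [x].
theorem step_lemma {tbl : List (List Char × List Char)} {x : List Char × List Char}
    {l : List (List Char × List Char)} (hok : okTbl tbl) (hx : x ∈ tbl)
    (hl : ∀ r ∈ l, r ∈ tbl) :
    ∀ (n : Nat) (cs : List Char), cs.length ≤ n →
      myRep x.1 x.2 (pvScan l cs) = pvScan (l ++ [x]) cs := by
  have hxne : x.1 ≠ [] := hok.1 x hx
  intro n
  induction n with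
  | zero =>
    intro cs hcs
    have : cs = [] := List.length_eq_zero_iff.mp (Nat.le_zero.mp hcs)
    subst this
    rw [pvScan_nil, pvScan_nil, myRep_nil]
  | succ n ihn =>
    intro cs hcs
    cases cs with
    | nil => rw [pvScan_nil, pvScan_nil, myRep_nil]
    | cons c t =>
      cases hf : l.find? (fun pr => pr.1.isPrefixOf (c :: t)) with
      | some pr =>
        have hprmem : pr ∈ tbl := hl _ (List.mem_of_find?_eq_some hf)
        have hf' : (l ++ [x]).find? (fun pr => pr.1.isPrefixOf (c :: t)) = some pr := by
          rw [List.find?_append, hf]; rfl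
        rw [pvScan_cons_some hf, pvScan_cons_some hf']
        have hrep := (hok.2 x hx pr hprmem).1
        rw [rep_skip pr.2 (fun k hk => hrep k hk)]
        congr 1
        exact ihn _ (by simp only [List.length_drop, List.length_cons] at hcs ⊢; omega)
      | none =>
        by_cases hm : x.1 <+: (c :: t)
        · -- the new rule x matches at the head
          obtain ⟨v, hv⟩ := hm
          have hvlen : v.length + x.1.length = t.length + 1 := by
            have := congrArg List.length hv
            simp at this
            omega
          have hxpos : 1 ≤ x.1.length := by
            cases hx1 : x.1 with
            | nil => exact absurd hx1 hxne
            | cons a b => simp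
          -- no rule of l matches anywhere inside the x.1 block
          have hnone : ∀ q, q < x.1.length →
              l.find? (fun pr => pr.1.isPrefixOf ((x.1 ++ v).drop q)) = none := by
            intro q hq
            cases q with
            | zero =>
              simpa [hv] using hf
            | succ q' =>
              rw [List.find?_eq_none]
              intro pr hpr hb
              have hprmem : pr ∈ tbl := hl _ hpr
              have hpp := ((hok.2 x hx pr hprmem).2 (q' + 1) hq).2 (by omega)
              rw [List.drop_append_of_le_length (by omega)] at hb
              rcases prefix_append_cases (List.isPrefixOf_iff_prefix.mp hb) with h1 | h1
              · exact hpp.1 h1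
              · exact hpp.2 h1
          have hscanl : pvScan l (c :: t) = x.1 ++ pvScan l v := by
            rw [← hv]
            exact scan_skip x.1 hnone
          have hfx : (l ++ [x]).find? (fun pr => pr.1.isPrefixOf (c :: t)) = some x := by
            rw [List.find?_append, hf]
            simp [List.find?, List.isPrefixOf_iff_prefix.mpr ⟨v, hv⟩]
          rw [hscanl, pvScan_cons_some hfx]
          have hdropv : t.drop (x.1.length - 1) = v := by
            have : (c :: t).drop x.1.length = v := by rw [← hv]; simp
            have h1 : x.1.length - 1 + 1 = x.1.length := by omega
            rw [← this, ← h1, List.drop_succ_cons]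
            simp only [Nat.add_sub_cancel]
          rw [hdropv]
          rw [myRep_pos x.2 hxne (List.prefix_append x.1 (pvScan l v))]
          rw [List.drop_append_of_le_length (le_refl _), List.drop_length, List.nil_append]
          congr 1
          exact ihn v (by simp only [List.length_cons] at hcs; omega)
        · -- no rule at all matches at the head
          have hfx : (l ++ [x]).find? (fun pr => pr.1.isPrefixOf (c :: t)) = none := by
            rw [List.find?_append, hf]
            have hb : x.1.isPrefixOf (c :: t) = false := by
              rw [Bool.eq_false_iff]
              intro hb
              exact hm (List.isPrefixOf_iff_prefix.mp hb)
            simp [List.find?, hb]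
          rw [pvScan_cons_none hf, pvScan_cons_none hfx]
          have hxpos : 0 < x.1.length := by
            cases hx1 : x.1 with
            | nil => exact absurd hx1 hxne
            | cons a b => simp
          have hnc : ¬ x.1 <+: c :: pvScan l t := by
            intro hpre
            have : x.1 <+: pvScan l (c :: t) := by
              rw [pvScan_cons_none hf]; exact hpre
            have := scan_no_create hok hl hx (n + 1) (c :: t) hcs 0 hxpos
              (by simpa using this)
            exact hm (by simpa using this)
          rw [myRep_neg x.2 hnc]
          congr 1
          exact ihn t (by simpa using Nat.lt_succ_iff.mp (by simpa using hcs))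

theorem pvScan_nil_rules : ∀ cs : List Char, pvScan [] cs = cs := by
  intro cs
  induction cs with
  | nil => exact pvScan_nil []
  | cons c t ih => rw [pvScan_cons_none (by simp), ih]

theorem foldl_myRep_eq_scan {tbl : List (List Char × List Char)} (hok : okTbl tbl) :
    ∀ (l : List (List Char × List Char)), (∀ r ∈ l, r ∈ tbl) →
      ∀ cs, l.foldl (fun out pr => myRep pr.1 pr.2 out) cs = pvScan l cs := by
  intro l
  induction l using List.reverseRecOn with
  | nil => intro _ cs; rw [pvScan_nil_rules]; rfl
  | append_singleton l x ih =>
    intro hl cs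
    have hl' : ∀ r ∈ l, r ∈ tbl := fun r hr => hl r (List.mem_append_left _ hr)
    have hx : x ∈ tbl := hl x (List.mem_append_right _ (List.mem_singleton_self x))
    rw [List.foldl_append, List.foldl_cons, List.foldl_nil, ih hl' cs]
    exact step_lemma hok hx hl' cs.length cs (le_refl _)

theorem go_eq {p r : List Char} (hp : p ≠ []) :
    ∀ (fuel : Nat) (l acc : List Char), l.length ≤ fuel →
      PySem.Chars.replace.go p r fuel l acc = acc.reverse ++ myRep p r l := by
  intro fuel
  induction fuel with
  | zero =>
    intro l acc hl
    have : l = [] := List.length_eq_zero_iff.mp (Nat.le_zero.mp hl)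
    subst this
    rw [PySem.Chars.replace.go, myRep_nil]
  | succ fuel ih =>
    intro l acc hl
    cases l with
    | nil =>
      rw [PySem.Chars.replace.go, myRep_nil]
      · simp
      · omega
    | cons c t =>
      rw [PySem.Chars.replace.go]
      by_cases hpre : p.isPrefixOf (c :: t)
      · rw [if_pos hpre]
        have hplen : 1 ≤ p.length := by
          cases hp1 : p with
          | nil => exact absurd hp1 hp
          | cons a b => simp
        have hlen : (List.drop p.length (c :: t)).length ≤ fuel := by
          simp only [List.length_drop, List.length_cons]
          simp only [List.length_cons] at hl
          omega
        rw [ih _ _ hlen]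
        have hmp : myRep p r (c :: t) = r ++ myRep p r (List.drop p.length (c :: t)) :=
          myRep_pos r hp (List.isPrefixOf_iff_prefix.mp hpre)
        rw [hmp]
        simp
      · rw [if_neg hpre]
        have hlen : t.length ≤ fuel := by
          simp only [List.length_cons] at hl
          omega
        rw [ih _ _ hlen]
        rw [myRep_neg r (fun hb => hpre (List.isPrefixOf_iff_prefix.mpr hb))]
        simp

theorem replace_eq_myRep {p r s : List Char} (hp : p ≠ []) :
    PySem.Chars.replace s p r = myRep p r s := by
  rw [PySem.Chars.replace]
  rw [if_neg (by simpa using hp)]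
  rw [go_eq hp s.length s [] (le_refl _)]
  simp

-- the A-side foldl over Str.replace, moved to the character level
theorem strfold_toList (l : List (String × String)) :
    ∀ (s : String),
      (l.foldl (fun out pr => PySem.Str.replace out (pr.1 ++ " contains ") (pr.2 ++ " contains ")) s).toList
        = (l.map (fun pr => ((pr.1 ++ " contains ").toList, (pr.2 ++ " contains ").toList))).foldl
            (fun out pr => PySem.Chars.replace out pr.1 pr.2) s.toList := by
  induction l with
  | nil => intro s; rfl
  | cons pr l ih =>
    intro s
    rw [List.foldl_cons, List.map_cons, List.foldl_cons, ih, PySem.Str.toList_replace]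

theorem chars_fold_myRep (l : List (List Char × List Char)) (h : ∀ pr ∈ l, pr.1 ≠ []) :
    ∀ cs, l.foldl (fun out pr => PySem.Chars.replace out pr.1 pr.2) cs
        = l.foldl (fun out pr => myRep pr.1 pr.2 out) cs := by
  induction l with
  | nil => intro cs; rfl
  | cons pr l ih =>
    intro cs
    rw [List.foldl_cons, List.foldl_cons,
      replace_eq_myRep (h pr (List.mem_cons_self)),
      ih (fun qr hq => h qr (List.mem_cons_of_mem _ hq))]

-- ===== VERDICT (by name: the statement is the Claim_ definition above) =====
theorem normalise_rationale_leading_section_spec : Claim_equal_normalise_rationale_leading_section := by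
  intro text _
  unfold Spec_normalise_rationale_leading_section
  cases text with
  | none => rfl
  | some s =>
    by_cases he : s.isEmpty
    · simp [normalise_rationale_leading_section, normalise_rationale_leading_section_alt, he]
    · have hA : normalise_rationale_leading_section (some s)
          = some (pvItems.foldl (fun out pr => PySem.Str.replace out (pr.1 ++ " contains ") (pr.2 ++ " contains ")) s) := by
        simp [normalise_rationale_leading_section, he]
      have hB : normalise_rationale_leading_section_alt (some s)
          = some (String.ofList (pvScan pvRules s.toList)) := by
        simp [normalise_rationale_leading_section_alt, he]
      rw [hA, hB]
      refine congrArg some ?_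
      have h1 := strfold_toList pvItems s
      have h2 := chars_fold_myRep pvRules (by decide) s.toList
      have h3 := foldl_myRep_eq_scan okTbl_pvRules pvRules (fun r hr => hr) s.toList
      have hmap : pvItems.map (fun pr => ((pr.1 ++ " contains ").toList, (pr.2 ++ " contains ").toList)) = pvRules := rfl
      rw [hmap] at h1
      calc pvItems.foldl (fun out pr => PySem.Str.replace out (pr.1 ++ " contains ") (pr.2 ++ " contains ")) s
          = String.ofList (pvItems.foldl (fun out pr => PySem.Str.replace out (pr.1 ++ " contains ") (pr.2 ++ " contains ")) s).toList := String.ofList_toList.symm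
        _ = String.ofList (pvScan pvRules s.toList) := by rw [h1, h2, h3]
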